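-- pv_equiv track=rewrite | github.com/dante7867/AdventOfCode2023 | d12/solution.py | create_raport
-- ===== SOURCE A (Python) =====
-- def create_raport(spring):
--     raport = []
--     cnt = 0
--     for ch in spring:
--         if ch == '#':
--             cnt += 1
--         else:
--             if cnt:
--                 raport.append(cnt)
--                 cnt = 0
--     if cnt:
--         raport.append(cnt)
--
--     return raport
-- ===== SOURCE B (Python) =====
-- from itertools import groupby
--
-- def create_raport(spring):
--     return [sum(1 for _ in g) for k, g in groupby(spring) if k == '#']
-- ===== Notes on version B (the rewrite author's own statement) =====
-- stated objective: idiomatic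
-- what changed: Replaces the explicit counter with flush-at-end logic by itertools.groupby: group consecutive equal characters, keep groups keyed '#', take their lengths.
import Mathlib
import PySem

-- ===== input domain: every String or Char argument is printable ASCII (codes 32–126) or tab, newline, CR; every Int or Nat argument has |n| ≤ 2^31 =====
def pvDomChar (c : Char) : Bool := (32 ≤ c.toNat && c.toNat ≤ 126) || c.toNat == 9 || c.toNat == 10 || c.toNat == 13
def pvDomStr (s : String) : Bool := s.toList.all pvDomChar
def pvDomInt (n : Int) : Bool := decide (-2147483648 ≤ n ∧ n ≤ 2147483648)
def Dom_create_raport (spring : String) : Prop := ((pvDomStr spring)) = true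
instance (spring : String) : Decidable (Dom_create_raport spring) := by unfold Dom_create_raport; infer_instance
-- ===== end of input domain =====

-- B re-implements A with a groupby decomposition (group consecutive equal chars,
-- filter key '#', take lengths) instead of A's explicit counter with flush-at-end.


-- ===== PORT A =====
-- A's for-loop over the characters with the (raport, cnt) state, transcribed as
-- structural recursion; the trailing 'if cnt' flush is the base case.
def createRaportLoopA : List Char → List Int → Int → List Int
  | [], raport, cnt => if cnt ≠ 0 then raport ++ [cnt] else raport
  | ch :: rest, raport, cnt =>
      if ch = '#' then createRaportLoopA rest raport (cnt + 1)
      else if cnt ≠ 0 then createRaportLoopA rest (raport ++ [cnt]) 0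
      else createRaportLoopA rest raport cnt

def create_raport (spring : String) : List Int :=
  createRaportLoopA spring.toList [] 0

-- ===== PORT B =====
-- itertools.groupby: consecutive runs of equal characters with their lengths
-- (each group consumed by sum(1 for _ in g), counted as a Python int).
def groupbyGo (k : Char) (n : Int) : List Char → List (Char × Int)
  | [] => [(k, n)]
  | c :: rest => if c = k then groupbyGo k (n + 1) rest
                 else (k, n) :: groupbyGo c 1 rest

def groupbyRuns : List Char → List (Char × Int)
  | [] => []
  | c :: rest => groupbyGo c 1 rest

def create_raport_alt (spring : String) : List Int :=
  ((groupbyRuns spring.toList).filter (fun p => p.1 = '#')).map (fun p => p.2)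

-- ===== PRECONDITION & SPEC =====
def Spec_create_raport (spring : String) (out : List Int) : Prop := out = create_raport_alt spring
instance (spring : String) (out : List Int) : Decidable (Spec_create_raport spring out) := by unfold Spec_create_raport; infer_instance

-- ===== CLAIM (what is proved, stated in full; the proofs are below) =====
def Claim_equal_create_raport : Prop := ∀ (spring : String), Dom_create_raport spring → Spec_create_raport spring (create_raport spring)

-- ===== LEMMAS AND PROOFS =====

def pvF (gs : List (Char × Int)) : List Int :=
  (gs.filter (fun p => p.1 = '#')).map (fun p => p.2)

theorem createRaportLoop_eq (l : List Char) :
    (∀ (r : List Int) (c : Int), 1 ≤ c →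
        createRaportLoopA l r c = r ++ pvF (groupbyGo '#' c l)) ∧
    (∀ (r : List Int) (k : Char) (n : Int), k ≠ '#' →
        createRaportLoopA l r 0 = r ++ pvF (groupbyGo k n l)) := by
  induction l with
  | nil =>
    constructor
    · intro r c hc
      have hne : c ≠ 0 := by omega
      simp [createRaportLoopA, groupbyGo, pvF, hne]
    · intro r k n hk
      simp [createRaportLoopA, groupbyGo, pvF, hk]
  | cons ch rest ih =>
    constructor
    · intro r c hc
      by_cases h : ch = '#'
      · subst h
        simp only [createRaportLoopA, if_pos rfl, groupbyGo, if_pos rfl]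
        exact ih.1 r (c + 1) (by omega)
      · have hne : c ≠ 0 := by omega
        simp only [createRaportLoopA, if_neg h, if_pos hne, groupbyGo, if_neg h]
        rw [ih.2 (r ++ [c]) ch 1 h]
        simp [pvF]
    · intro r k n hk
      by_cases h : ch = '#'
      · subst h
        have hkc : ('#' : Char) ≠ k := fun e => hk e.symm
        have h1 : createRaportLoopA (('#' : Char) :: rest) r 0 = createRaportLoopA rest r 1 := by
          simp [createRaportLoopA]
        rw [h1, ih.1 r 1 le_rfl]
        simp only [groupbyGo, if_neg hkc]
        simp [pvF, hk]
      · simp only [createRaportLoopA, if_neg h]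
        by_cases hck : ch = k
        · subst hck
          simp only [groupbyGo, if_pos rfl]
          have := ih.2 r ch (n + 1) h
          simpa using this
        · simp only [groupbyGo, if_neg hck]
          rw [ih.2 r ch 1 h]
          simp [pvF, hk]

-- ===== VERDICT (by name: the statement is the Claim_ definition above) =====
theorem create_raport_spec : Claim_equal_create_raport := by
  intro spring _
  unfold Spec_create_raport create_raport create_raport_alt
  cases hl : spring.toList with
  | nil => simp [createRaportLoopA, groupbyRuns]
  | cons ch rest =>
    show createRaportLoopA (ch :: rest) [] 0 = pvF (groupbyRuns (ch :: rest))
    by_cases h : ch = '#'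
    · subst h
      simp only [createRaportLoopA, if_pos rfl, groupbyRuns]
      have := (createRaportLoop_eq rest).1 [] 1 le_rfl
      simpa using this
    · simp only [createRaportLoopA, if_neg h, groupbyRuns]
      have := (createRaportLoop_eq rest).2 [] ch 1 h
      simpa using this
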